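-- pv_equiv track=rewrite | github.com/mattdloring/fishFlux | fish.py | simplechange
-- ===== SOURCE A (Python) =====
-- def simplechange(mylist):
--     q = mylist[0].split('_')[1]
--
--     times = []
--     stim_ids = []
--     for n, i in enumerate(mylist):
--
--         splitup = i.split('_')
--
--         if splitup[1] != q:
--             times.append(splitup[0])
--             stim_ids.append(splitup[1])
--
--         q = splitup[1]
--     return times, stim_ids
-- ===== SOURCE B (Python) =====
-- def simplechange(mylist):
--     keys = [s.split('_') for s in mylist]
--     n = len(keys)
--     runs = []
--     i = 0
--     while i < n:
--         runs.append(keys[i])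
--         k = keys[i][1]
--         j = i
--         while j < n and keys[j][1] == k:
--             j += 1
--         i = j
--     heads = runs[1:]
--     return [h[0] for h in heads], [h[1] for h in heads]
-- ===== Notes on version B (the rewrite author's own statement) =====
-- stated objective: alternative
-- what changed: B replaces A's running-prev per-element comparison with run segmentation in the groupby style: an outer loop jumps from run head to run head via an inner scan that finds each run's end, then emits the head fields of every run after the first.
import Mathlib
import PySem

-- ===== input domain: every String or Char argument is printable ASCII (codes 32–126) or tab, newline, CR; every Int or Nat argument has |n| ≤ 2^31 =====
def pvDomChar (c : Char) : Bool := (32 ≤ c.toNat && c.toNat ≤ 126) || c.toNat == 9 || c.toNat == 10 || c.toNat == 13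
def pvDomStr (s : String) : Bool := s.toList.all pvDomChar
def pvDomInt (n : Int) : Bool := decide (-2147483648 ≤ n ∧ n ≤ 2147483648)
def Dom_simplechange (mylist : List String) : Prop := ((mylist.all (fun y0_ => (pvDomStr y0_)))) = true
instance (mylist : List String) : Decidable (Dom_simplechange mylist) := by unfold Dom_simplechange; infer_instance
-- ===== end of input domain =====

-- B replaces A's running-prev per-element comparison by run segmentation: an
-- outer loop jumps from run head to run head, an inner scan finds each run's
-- end, and the run heads after the first are emitted (objective: alternative,
-- same O(n) cost; return value only).

-- shared primitive: Python s.split('_') ('_' is non-empty, so split? is always some)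
def pvSplit (s : String) : List String := (PySem.Str.split? s "_").getD []

-- ===== PORT A =====
-- A's splitup[1] / splitup[0]: under Pre_ every element contains '_', so the
-- split has >= 2 parts and getD's default is never taken (Python would raise otherwise).
-- the loop body of A (state = (times, stim_ids, q))
def pvStepA (st : List String × List String × String) (i : String) : List String × List String × String :=
  let splitup := pvSplit i
  let s1 := splitup.getD 1 ""
  if s1 ≠ st.2.2 then (st.1 ++ [splitup.getD 0 ""], st.2.1 ++ [s1], s1)
  else (st.1, st.2.1, s1)

def simplechange (mylist : List String) : List String × List String :=
  let q0 := (pvSplit (mylist.headD "")).getD 1 ""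
  let r := mylist.foldl pvStepA ([], [], q0)
  (r.1, r.2.1)

-- ===== PORT B =====
-- keys[j][1] (default never taken under Pre_, where Python would raise otherwise)
def pvKeyOf (z : List String) : String := z.getD 1 ""

-- B's inner while: advance j past the run whose key is k
def pvRunEnd (keys : List (List String)) (k : String) (j : Nat) : Nat :=
  if h : j < keys.length ∧ pvKeyOf (keys.getD j []) = k then pvRunEnd keys k (j+1) else j
termination_by keys.length - j
decreasing_by omega

-- termination helper for pvHeads (the outer loop strictly advances)
theorem pvRunEnd_ge (keys : List (List String)) (k : String) (j : Nat) :
    j ≤ pvRunEnd keys k j := by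
  induction j using pvRunEnd.induct keys k with
  | case1 j h ih => rw [pvRunEnd, dif_pos h]; omega
  | case2 j h => rw [pvRunEnd, dif_neg h]

-- B's outer while: collect the head of every run
def pvHeads (keys : List (List String)) (i : Nat) : List (List String) :=
  if h : i < keys.length then
    keys.getD i [] :: pvHeads keys (pvRunEnd keys (pvKeyOf (keys.getD i [])) i)
  else []
termination_by keys.length - i
decreasing_by
  have h1 : pvRunEnd keys (pvKeyOf (keys.getD i [])) i
      = pvRunEnd keys (pvKeyOf (keys.getD i [])) (i+1) := by
    rw [pvRunEnd]; exact dif_pos ⟨h, rfl⟩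
  have h2 := pvRunEnd_ge keys (pvKeyOf (keys.getD i [])) (i+1)
  omega

def simplechange_alt (mylist : List String) : List String × List String :=
  let keys := mylist.map (fun s => pvSplit s)
  let heads := (pvHeads keys 0).drop 1
  (heads.map (fun h => h.getD 0 ""), heads.map (fun h => h.getD 1 ""))

-- ===== PRECONDITION & SPEC =====
-- Pre_ excludes exactly the inputs where Python A raises IndexError:
-- the empty list (mylist[0]) and any element without '_' (splitup[1]).
def Pre_simplechange (mylist : List String) : Prop :=
  mylist ≠ [] ∧ ∀ s ∈ mylist, '_' ∈ s.toList
instance (mylist : List String) : Decidable (Pre_simplechange mylist) := by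
  unfold Pre_simplechange; infer_instance
def pvWitness_simplechange : List String := ["1_a", "2_b", "3_b"]

def Spec_simplechange (mylist : List String) (out : List String × List String) : Prop := out = simplechange_alt mylist
instance (mylist : List String) (out : List String × List String) : Decidable (Spec_simplechange mylist out) := by unfold Spec_simplechange; infer_instance

-- ===== CLAIM (what is proved, stated in full; the proofs are below) =====
def Claim_equal_simplechange : Prop := ∀ (mylist : List String), Dom_simplechange mylist → Pre_simplechange mylist → Spec_simplechange mylist (simplechange mylist)

-- ===== LEMMAS AND PROOFS =====

-- run heads of a list of splits, previous key q (the common characterisation)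
def runheadsK (q : String) : List (List String) → List (List String)
  | [] => []
  | z :: zs => if pvKeyOf z ≠ q then z :: runheadsK (pvKeyOf z) zs
               else runheadsK (pvKeyOf z) zs

-- the key of the last split (q if none)
def lastK (q : String) : List (List String) → String
  | [] => q
  | z :: zs => lastK (pvKeyOf z) zs

-- A's fold, characterised
theorem pvFoldA (l : List String) : ∀ (t s : List String) (q : String),
    l.foldl pvStepA (t, s, q)
    = (t ++ (runheadsK q (l.map pvSplit)).map (fun k => k.getD 0 ""),
       s ++ (runheadsK q (l.map pvSplit)).map (fun k => k.getD 1 ""),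
       lastK q (l.map pvSplit)) := by
  induction l with
  | nil => intro t s q; simp [runheadsK, lastK]
  | cons x xs ih =>
      intro t s q
      rw [List.foldl_cons]
      by_cases h : pvKeyOf (pvSplit x) = q
      · have hs : pvStepA (t, s, q) x = (t, s, pvKeyOf (pvSplit x)) := by
          simp only [pvStepA, pvKeyOf, List.getD] at h ⊢; simp [h]
        rw [hs, ih]
        simp [runheadsK, lastK, h]
      · have hs : pvStepA (t, s, q) x
            = (t ++ [(pvSplit x).getD 0 ""], s ++ [pvKeyOf (pvSplit x)], pvKeyOf (pvSplit x)) := by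
          simp only [pvStepA, pvKeyOf, List.getD] at h ⊢; simp [h]
        rw [hs, ih]
        simp only [pvKeyOf, List.getD] at h
        simp [runheadsK, lastK, h, pvKeyOf, List.getD]

-- B's run segmentation, characterised structurally
def headsL : List (List String) → List (List String)
  | [] => []
  | z :: zs => z :: headsL (zs.dropWhile (fun w => pvKeyOf w == pvKeyOf z))
termination_by l => l.length
decreasing_by
  have := List.length_dropWhile_le (fun w => pvKeyOf w == pvKeyOf z) zs
  simp; omega

theorem runEnd_drop (keys : List (List String)) (k : String) (j : Nat) :
    keys.drop (pvRunEnd keys k j) = (keys.drop j).dropWhile (fun w => pvKeyOf w == k) := by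
  induction j using pvRunEnd.induct keys k with
  | case1 j h ih =>
      obtain ⟨hj, hk⟩ := h
      rw [pvRunEnd, dif_pos ⟨hj, hk⟩, ih, List.drop_eq_getElem_cons hj, List.dropWhile_cons]
      rw [List.getD_eq_getElem keys [] hj] at hk
      simp [hk]
  | case2 j h =>
      rw [pvRunEnd, dif_neg h]
      by_cases hj : j < keys.length
      · have hk : pvKeyOf (keys.getD j []) ≠ k := fun he => h ⟨hj, he⟩
        rw [List.getD_eq_getElem keys [] hj] at hk
        rw [List.drop_eq_getElem_cons hj, List.dropWhile_cons]
        simp [hk]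
      · rw [List.drop_eq_nil_of_le (by omega)]; rfl

theorem heads_drop (keys : List (List String)) (i : Nat) :
    pvHeads keys i = headsL (keys.drop i) := by
  induction i using pvHeads.induct keys with
  | case1 i h ih =>
      rw [pvHeads, dif_pos h, ih]
      have e1 : pvRunEnd keys (pvKeyOf (keys.getD i [])) i
          = pvRunEnd keys (pvKeyOf (keys.getD i [])) (i+1) := by
        rw [pvRunEnd]; exact dif_pos ⟨h, rfl⟩
      rw [e1, runEnd_drop, List.drop_eq_getElem_cons h]
      simp only [headsL]
      rw [List.getD_eq_getElem keys [] h]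
  | case2 i h =>
      rw [pvHeads, dif_neg h, List.drop_eq_nil_of_le (by omega)]
      simp [headsL]

theorem headsL_eq_runheads (zs : List (List String)) : ∀ (q : String),
    headsL (zs.dropWhile (fun w => pvKeyOf w == q)) = runheadsK q zs := by
  induction zs with
  | nil => intro q; simp [headsL, runheadsK]
  | cons z zs ih =>
      intro q
      by_cases h : pvKeyOf z = q
      · rw [List.dropWhile_cons]
        simp only [h, beq_self_eq_true, if_true]
        rw [ih q]
        simp [runheadsK, h]
      · have hb : (pvKeyOf z == q) = false := by simp [h]
        rw [List.dropWhile_cons, hb]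
        simp only [Bool.false_eq_true, if_false, headsL]
        rw [ih (pvKeyOf z)]
        simp [runheadsK, h]

-- ===== VERDICT (by name: the statement is the Claim_ definition above) =====
theorem simplechange_spec : Claim_equal_simplechange := by
  intro mylist _ hpre
  obtain ⟨hne, -⟩ := hpre
  unfold Spec_simplechange simplechange simplechange_alt
  cases mylist with
  | nil => exact absurd rfl hne
  | cons x xs =>
      have hstep : pvStepA ([], [], (pvSplit ((x :: xs).headD "")).getD 1 "") x
          = ([], [], pvKeyOf (pvSplit x)) := by
        simp [pvStepA, pvKeyOf]
      simp only [List.foldl_cons, hstep, List.map_cons]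
      rw [pvFoldA, heads_drop, List.drop_zero]
      simp only [headsL]
      rw [headsL_eq_runheads]
      simp
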